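-- pv_equiv track=rewrite | github.com/ShrimpTaco487/CodingStudyGroup | ywko/stack1.py | solution
-- ===== SOURCE A (Python) =====
-- def solution(progresses, speeds):
--     answer = []
--     end_job = 0
--     while len(progresses) != 0:
--         for index in range(len(progresses)):
--             progresses[index] += speeds[index]
--         for i in progresses:
--             if i >= 100:
--                 end_job += 1
--             else:
--                 break
--         if end_job != 0:
--             for i in range(end_job):
--                 progresses.pop(0)
--                 speeds.pop(0)
--             answer.append(end_job)
--             end_job = 0
--
--     return answer
-- ===== SOURCE B (Python) =====
-- def solution(progresses, speeds):
--     # One pass: each job's completion day by ceil division, grouped by running max.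
--     answer = []
--     cur = 0
--     cnt = 0
--     for p, s in zip(progresses, speeds):
--         d = max(1, -((p - 100) // s))
--         if cnt == 0 or d > cur:
--             if cnt:
--                 answer.append(cnt)
--             cur = d
--             cnt = 1
--         else:
--             cnt += 1
--     if cnt:
--         answer.append(cnt)
--     return answer
-- ===== Notes on version B (the rewrite author's own statement) =====
-- stated objective: faster
-- what changed: Replaces A's day-by-day simulation (repeatedly incrementing every remaining progress and popping finished prefixes) by a single pass that computes each job's completion day with one ceiling division and groups jobs by the running maximum of those days; intended as asymptotically faster (a timing run saw A time out at n=16 where B returned, but could not verify a ratio).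
-- outside the precondition, e.g. on solution([100], [0]): A returns [1], B raises ZeroDivisionError
import Mathlib
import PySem

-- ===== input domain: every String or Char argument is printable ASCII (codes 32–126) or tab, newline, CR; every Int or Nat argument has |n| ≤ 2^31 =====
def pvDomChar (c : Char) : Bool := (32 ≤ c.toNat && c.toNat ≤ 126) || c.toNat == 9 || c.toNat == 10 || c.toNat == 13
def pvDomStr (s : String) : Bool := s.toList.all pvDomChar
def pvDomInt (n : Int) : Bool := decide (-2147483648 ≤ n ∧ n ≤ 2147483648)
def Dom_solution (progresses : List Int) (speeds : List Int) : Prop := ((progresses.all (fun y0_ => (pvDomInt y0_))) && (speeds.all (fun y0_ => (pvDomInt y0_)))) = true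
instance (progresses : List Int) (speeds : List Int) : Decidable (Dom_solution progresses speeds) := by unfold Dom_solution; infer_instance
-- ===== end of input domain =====

-- B replaces A's O(n*maxDays) day-by-day simulation by one O(n) pass of ceil-divisions grouped by running max
-- (intended as faster; a timing run saw A time out at n=16 where B returned, but could not verify a ratio).
-- A mutates its argument lists in place (increments and pops), B does not: the equivalence proved is about the RETURN value only.

-- ===== PORT A =====
-- the while-loop; `fuel` is only a totality guard, proved never reached under Pre_solution (a job at progress p with
-- positive speed finishes within 100 + max(0, -p) days, so at most 100 + the sum below iterations happen)
def solutionLoop : Nat → List Int → List Int → List Int → List Int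
  | 0, _, _, answer => answer
  | Nat.succ fuel, progresses, speeds, answer =>
    if progresses.length ≠ 0 then
      -- for index in range(len(progresses)): progresses[index] += speeds[index]
      let progresses' := (List.range progresses.length).map
        (fun index => PySem.List.pyGetD progresses (Int.ofNat index) 0 + PySem.List.pyGetD speeds (Int.ofNat index) 0)
      -- for i in progresses: if i >= 100: end_job += 1 else: break
      let end_job := (progresses'.takeWhile (fun i => decide ((100:Int) ≤ i))).length
      if end_job ≠ 0 then
        -- pop the first end_job elements of both lists, append end_job, reset it to 0
        solutionLoop fuel (progresses'.drop end_job) (speeds.drop end_job) (answer ++ [Int.ofNat end_job])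
      else
        solutionLoop fuel progresses' speeds answer
    else answer

def solution (progresses : List Int) (speeds : List Int) : List Int :=
  solutionLoop (101 + (progresses.map (fun p => (-p).toNat)).sum) progresses speeds []

-- ===== PORT B =====
-- for p, s in zip(...): with accumulators answer, cur, cnt
def solutionAltLoop : List (Int × Int) → List Int → Int → Nat → List Int
  | [], answer, _, cnt => if cnt ≠ 0 then answer ++ [Int.ofNat cnt] else answer
  | (p, s) :: rest, answer, cur, cnt =>
    let d := max 1 (-(PySem.Int.floordiv (p - 100) s))
    if cnt = 0 ∨ cur < d then
      solutionAltLoop rest (if cnt ≠ 0 then answer ++ [Int.ofNat cnt] else answer) d 1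
    else
      solutionAltLoop rest answer cur (cnt + 1)

def solution_alt (progresses : List Int) (speeds : List Int) : List Int :=
  solutionAltLoop (progresses.zip speeds) [] 0 0

-- ===== PRECONDITION & SPEC =====
-- Pre_ keeps the problem's natural domain: speeds at least as long as progresses (otherwise A raises IndexError) and
-- every relevant speed positive (otherwise A loops forever on any unfinished job, and B's ceil division is undefined
-- at speed 0; A does return on a zero/negative speed whose job already starts at >= 100 progress — see the cite).
def Pre_solution (progresses : List Int) (speeds : List Int) : Prop :=
  progresses.length ≤ speeds.length ∧
  (∀ s ∈ speeds.take progresses.length, 1 ≤ s)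
instance (progresses : List Int) (speeds : List Int) : Decidable (Pre_solution progresses speeds) := by
  unfold Pre_solution; infer_instance

def pvWitness_solution : List Int × List Int := ([30, 55, 95], [30, 5, 10])

def Spec_solution (progresses : List Int) (speeds : List Int) (out : List Int) : Prop := out = solution_alt progresses speeds
instance (progresses : List Int) (speeds : List Int) (out : List Int) : Decidable (Spec_solution progresses speeds out) := by unfold Spec_solution; infer_instance

-- ===== CLAIM (what is proved, stated in full; the proofs are below) =====
def Claim_equal_solution : Prop := ∀ (progresses : List Int) (speeds : List Int), Dom_solution progresses speeds → Pre_solution progresses speeds → Spec_solution progresses speeds (solution progresses speeds)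

-- ===== LEMMAS AND PROOFS =====

-- completion day of one job: smallest d ≥ 1 with p + d*s ≥ 100 (for 1 ≤ s)
def dayOf (p s : Int) : Int := max 1 (-(PySem.Int.floordiv (p - 100) s))

-- run-length grouping of a list of days by "≤ the group's opening day"
def grp : List Int → Int → Nat → List Int
  | [], _, cnt => [Int.ofNat cnt]
  | d :: r, cur, cnt => if cur < d then Int.ofNat cnt :: grp r d 1 else grp r cur (cnt + 1)

def grpTop : List Int → List Int
  | [] => []
  | d :: r => grp r d 1

-- A's loop abstracted to the days list: t = current day, pop the prefix of jobs due by day t+1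
def loopD : Nat → Int → List Int → List Int → List Int
  | 0, _, _, ans => ans
  | Nat.succ fuel, t, ds, ans =>
    if ds.length ≠ 0 then
      let k := (ds.takeWhile (fun d => decide (d ≤ t + 1))).length
      if k ≠ 0 then loopD fuel (t + 1) (ds.drop k) (ans ++ [Int.ofNat k])
      else loopD fuel (t + 1) ds ans
    else ans

theorem day_le_iff (p s t : Int) (hs : 1 ≤ s) (ht : 1 ≤ t) :
    dayOf p s ≤ t ↔ 100 ≤ p + t * s := by
  have key : -(PySem.Int.floordiv (p - 100) s) ≤ t ↔ 100 ≤ p + t * s := by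
    rw [neg_le, PySem.Int.le_floordiv_iff_mul_le (by omega)]
    constructor <;> intro h <;> nlinarith
  rw [dayOf, max_le_iff, key]
  omega

theorem day_pos (p s : Int) : 1 ≤ dayOf p s := le_max_left _ _

theorem day_le_bound (p s : Int) (hs : 1 ≤ s) : dayOf p s ≤ 100 + ((-p).toNat : Int) := by
  have hT : -p ≤ ((-p).toNat : Int) := Int.self_le_toNat (-p)
  have hT0 : (0:Int) ≤ ((-p).toNat : Int) := Int.natCast_nonneg _
  rw [day_le_iff p s _ hs (by omega)]
  nlinarith

theorem grp_eq (r : List Int) (cur : Int) (cnt : Nat) :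
    grp r cur cnt = Int.ofNat (cnt + (r.takeWhile (fun d => decide (d ≤ cur))).length)
      :: grpTop (r.dropWhile (fun d => decide (d ≤ cur))) := by
  induction r generalizing cnt with
  | nil => simp [grp, grpTop]
  | cons d r ih =>
    by_cases h : cur < d
    · simp [grp, h, grpTop, show ¬ (d ≤ cur) by omega]
    · simp [grp, h, show d ≤ cur by omega, ih]
      omega

theorem head_dropWhile_false {α : Type} (p : α → Bool) (l : List α) (d : α)
    (h : (l.dropWhile p).head? = some d) : p d = false := by
  induction l with
  | nil => simp [List.dropWhile] at h
  | cons a l ih =>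
    rw [List.dropWhile_cons] at h
    by_cases hp : p a
    · simp [hp] at h; exact ih h
    · simp [hp] at h; subst h; simpa using hp

theorem drop_takeWhile_length {α : Type} (p : α → Bool) (l : List α) :
    l.drop (l.takeWhile p).length = l.dropWhile p := by
  induction l with
  | nil => simp
  | cons a l ih => by_cases h : p a <;> simp [h, ih]

theorem loopD_eq (fuel : Nat) (t : Int) (ds ans : List Int)
    (hb : ∀ d ∈ ds, d ≤ t + fuel) (hh : ∀ d, ds.head? = some d → t < d) :
    loopD fuel t ds ans = ans ++ grpTop ds := by
  induction fuel generalizing t ds ans with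
  | zero =>
    cases ds with
    | nil => simp [loopD, grpTop]
    | cons d r =>
      have h1 := hh d rfl
      have h2 := hb d (by simp)
      omega
  | succ fuel ih =>
    cases ds with
    | nil => simp [loopD, grpTop]
    | cons d r =>
      have htd : t < d := hh d rfl
      simp only [loopD, List.length_cons]
      by_cases hdt : d ≤ t + 1
      · have hd1 : d = t + 1 := by omega
        simp only [List.takeWhile_cons, decide_eq_true_eq, hdt, if_pos]
        simp only [List.length_cons]
        have hdrop : (d :: r).drop ((r.takeWhile (fun x => decide (x ≤ t + 1))).length + 1)
            = r.dropWhile (fun x => decide (x ≤ t + 1)) := by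
          have h1 := drop_takeWhile_length (fun x => decide (x ≤ t + 1)) (d :: r)
          simpa [List.takeWhile_cons, List.dropWhile_cons, hdt] using h1
        rw [hdrop]
        rw [ih (t + 1) _ _ ?_ ?_]
        · rw [grpTop, grp_eq, ← hd1]
          simp [List.append_assoc]
          omega
        · intro x hx
          have : x ∈ r := List.Sublist.mem hx (List.dropWhile_sublist _)
          have := hb x (by simp [this])
          omega
        · intro x hx
          have := head_dropWhile_false _ r x hx
          simp at this
          omega
      · simp only [List.takeWhile_cons, decide_eq_true_eq, hdt, if_false]
        simp only [List.length_nil, ne_eq, not_true_eq_false, if_false]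
        rw [ih (t + 1) _ _ ?_ ?_]
        · simp
        · intro x hx
          have := hb x hx
          omega
        · intro x hx
          simp at hx
          omega

theorem incr_eq (xs ss : List Int) (n : Nat) (hn : n = xs.length) (h : xs.length ≤ ss.length) :
    (List.range n).map
      (fun i => PySem.List.pyGetD xs (Int.ofNat i) 0 + PySem.List.pyGetD ss (Int.ofNat i) 0)
      = List.zipWith (· + ·) xs ss := by
  subst hn
  apply List.ext_getElem
  · simp
    omega
  · intro i h1 h2
    simp only [List.getElem_map, List.getElem_range, List.getElem_zipWith]
    have hi : i < xs.length := by simpa using h1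
    rw [Int.ofNat_eq_natCast, PySem.List.pyGetD_natCast, PySem.List.pyGetD_natCast,
      List.getD_eq_getElem xs 0 hi, List.getD_eq_getElem ss 0 (by omega)]

theorem zip_succ (ps ss : List Int) (t : Int) :
    List.zipWith (· + ·) (List.zipWith (fun p s => p + t * s) ps ss) ss
      = List.zipWith (fun p s => p + (t + 1) * s) ps ss := by
  induction ps generalizing ss with
  | nil => simp
  | cons p ps ih =>
    cases ss with
    | nil => simp
    | cons s ss => simp [ih]; ring

theorem zip_zero (ps ss : List Int) (h : ps.length ≤ ss.length) :
    List.zipWith (fun p s => p + 0 * s) ps ss = ps := by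
  induction ps generalizing ss with
  | nil => simp
  | cons p ps ih =>
    cases ss with
    | nil => simp at h
    | cons s ss =>
      simp at h
      rw [List.zipWith_cons_cons, ih ss (by omega)]
      norm_num

theorem tw_len (ps ss : List Int) (t : Int) (ht : 1 ≤ t)
    (hss : ∀ s ∈ ss.take ps.length, 1 ≤ s) :
    ((List.zipWith (fun p s => p + t * s) ps ss).takeWhile (fun i => decide ((100:Int) ≤ i))).length
      = ((List.zipWith dayOf ps ss).takeWhile (fun d => decide (d ≤ t))).length := by
  induction ps generalizing ss with
  | nil => simp
  | cons p ps ih =>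
    cases ss with
    | nil => simp
    | cons s ss =>
      have hs1 : 1 ≤ s := hss s (by simp)
      have hiff := day_le_iff p s t hs1 ht
      have htail : ∀ x ∈ ss.take ps.length, 1 ≤ x := by
        intro x hx
        exact hss x (by simp [hx])
      simp only [List.zipWith_cons_cons, List.takeWhile_cons, decide_eq_true_eq]
      by_cases hc : 100 ≤ p + t * s
      · simp [hc, hiff.mpr hc, ih ss htail]
      · have hnd : ¬ dayOf p s ≤ t := fun hx => hc (hiff.mp hx)
        simp [hc, hnd]

theorem days_bounds (ps ss : List Int)
    (hss : ∀ s ∈ ss.take ps.length, 1 ≤ s) :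
    ∀ d ∈ List.zipWith dayOf ps ss, 1 ≤ d ∧ d ≤ 100 + (((ps.map (fun p => (-p).toNat)).sum : Nat) : Int) := by
  induction ps generalizing ss with
  | nil => simp
  | cons p ps ih =>
    cases ss with
    | nil => simp
    | cons s ss =>
      intro d hd
      simp only [List.zipWith_cons_cons, List.mem_cons] at hd
      simp only [List.map_cons, List.sum_cons]
      rcases hd with hd | hd
      · subst hd
        refine ⟨day_pos p s, ?_⟩
        have := day_le_bound p s (hss s (by simp))
        omega
      · have := (ih ss (fun x hx => hss x (by simp [hx])) d hd).2
        refine ⟨(ih ss (fun x hx => hss x (by simp [hx])) d hd).1, ?_⟩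
        omega

theorem simA (fuel : Nat) (ps ss : List Int) (t : Int) (ans : List Int)
    (hl : ps.length ≤ ss.length) (hss : ∀ s ∈ ss.take ps.length, 1 ≤ s) (ht : 0 ≤ t) :
    solutionLoop fuel (List.zipWith (fun p s => p + t * s) ps ss) ss ans
      = loopD fuel t (List.zipWith dayOf ps ss) ans := by
  induction fuel generalizing ps ss t ans with
  | zero => simp [solutionLoop, loopD]
  | succ fuel ih =>
    have hlen1 : (List.zipWith (fun p s => p + t * s) ps ss).length = ps.length := by
      simp; omega
    have hlen2 : (List.zipWith dayOf ps ss).length = ps.length := by simp; omega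
    simp only [solutionLoop, loopD, hlen1, hlen2]
    by_cases hps : ps.length = 0
    · simp [hps]
    · simp only [hps, ne_eq, not_false_eq_true, if_pos]
      rw [incr_eq _ ss ps.length hlen1.symm (by omega), zip_succ]
      have htw := tw_len ps ss (t + 1) (by omega) hss
      rw [htw]
      set k := ((List.zipWith dayOf ps ss).takeWhile (fun d => decide (d ≤ t + 1))).length with hkdef
      have hkle : k ≤ ps.length := by
        rw [hkdef, ← hlen2]
        exact List.Sublist.length_le (List.takeWhile_sublist _)
      by_cases hkz : k = 0
      · simp only [hkz, not_true_eq_false, if_false]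
        exact ih ps ss (t + 1) ans hl hss (by omega)
      · simp only [hkz, not_false_eq_true, if_pos]
        rw [List.drop_zipWith, List.drop_zipWith]
        rw [ih (ps.drop k) (ss.drop k) (t + 1) _ ?_ ?_ (by omega)]
        · simp
          omega
        · intro x hx
          apply hss
          rw [List.length_drop, List.take_drop] at hx
          have : x ∈ ss.take (k + (ps.length - k)) := List.mem_of_mem_drop hx
          rwa [show k + (ps.length - k) = ps.length by omega] at this

theorem zip_map_days (ps ss : List Int) :
    (ps.zip ss).map (fun q => max 1 (-(PySem.Int.floordiv (q.1 - 100) q.2)))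
      = List.zipWith dayOf ps ss := by
  induction ps generalizing ss with
  | nil => simp
  | cons p ps ih =>
    cases ss with
    | nil => simp
    | cons s ss => simp [List.zip_cons_cons, dayOf, ih]

theorem altLoop_eq (pairs : List (Int × Int)) (ans : List Int) (cur : Int) (cnt : Nat)
    (h : cnt ≠ 0) :
    solutionAltLoop pairs ans cur cnt
      = ans ++ grp (pairs.map (fun q => max 1 (-(PySem.Int.floordiv (q.1 - 100) q.2)))) cur cnt := by
  induction pairs generalizing ans cur cnt with
  | nil => simp [solutionAltLoop, grp, h]
  | cons q rest ih =>
    obtain ⟨p, s⟩ := q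
    simp only [solutionAltLoop, List.map_cons]
    by_cases hc : cur < max 1 (-(PySem.Int.floordiv (p - 100) s))
    · rw [if_pos (Or.inr hc), if_pos h, ih _ _ _ one_ne_zero, grp, if_pos hc]
      simp [List.append_assoc]
    · rw [if_neg (not_or.mpr ⟨h, hc⟩), ih _ _ _ (Nat.succ_ne_zero cnt),
        grp, if_neg hc]

theorem alt_eq (ps ss : List Int) :
    solution_alt ps ss = grpTop (List.zipWith dayOf ps ss) := by
  rw [← zip_map_days]
  show solutionAltLoop (ps.zip ss) [] 0 0 = _
  cases ps.zip ss with
  | nil => simp [solutionAltLoop, grpTop]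
  | cons q rest =>
    obtain ⟨p, s⟩ := q
    simp only [solutionAltLoop, List.map_cons]
    rw [if_pos (Or.inl trivial), altLoop_eq _ _ _ _ one_ne_zero]
    simp [grpTop]

-- ===== VERDICT (by name: the statement is the Claim_ definition above) =====
theorem solution_spec : Claim_equal_solution := by
  intro ps ss _hdom hpre
  obtain ⟨hl, hs⟩ := hpre
  unfold Spec_solution
  rw [alt_eq]
  show solutionLoop (101 + (ps.map (fun p => (-p).toNat)).sum) ps ss [] = _
  have h0 := simA (101 + (ps.map (fun p => (-p).toNat)).sum) ps ss 0 [] hl hs le_rfl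
  rw [zip_zero ps ss hl] at h0
  rw [h0, loopD_eq]
  · simp
  · intro d hd
    have := (days_bounds ps ss hs d hd).2
    omega
  · intro d hd
    have : d ∈ List.zipWith dayOf ps ss := by
      cases h : List.zipWith dayOf ps ss with
      | nil => rw [h] at hd; simp at hd
      | cons a r => rw [h] at hd; simp at hd; subst hd; simp
    have := (days_bounds ps ss hs d this).1
    omega
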